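-- pv_equiv track=rewrite | github.com/Gajarthan/hayleys-data-engine | hayl-status-checker/validate_opencode_reports.py | _extract_line_numbers
-- ===== SOURCE A (Python) =====
-- METRIC_HINTS = {
--     "revenue": ("revenue", "turnover", "sales"),
--     "net_income": ("net income", "profit after tax", "pat", "profit for the year"),
--     "eps": ("eps", "earnings per share"),
--     "operating_profit": ("operating profit", "operating income", "results from operating"),
--     "ebitda": ("ebitda",),
--     "issued_shares": ("issued shares", "no. of shares", "shares"),
--     "par_value": ("par value",),
--     "market_cap": ("market capitalisation", "market capitalization", "market cap"),
--     "foreign_percentage": ("foreign", "foreign percentage"),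
--     "pe_ratio": ("p/e", "price earnings", "pe ratio"),
--     "pb_ratio": ("p/b", "price book", "pb ratio"),
--     "dividend_yield": ("dividend yield",),
-- }
--
-- def _extract_line_numbers(text, metric):
--     hints = METRIC_HINTS.get(metric, ())
--     if not hints:
--         return []
--     lines = text.splitlines()
--     matches = []
--     for idx, line in enumerate(lines, start=1):
--         lowered = line.lower()
--         if any(hint in lowered for hint in hints):
--             matches.append((idx, line))
--     return matches
-- ===== SOURCE B (Python) =====
-- METRIC_HINTS = {
--     "revenue": ("revenue", "turnover", "sales"),
--     "net_income": ("net income", "profit after tax", "pat", "profit for the year"),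
--     "eps": ("eps", "earnings per share"),
--     "operating_profit": ("operating profit", "operating income", "results from operating"),
--     "ebitda": ("ebitda",),
--     "issued_shares": ("issued shares", "no. of shares", "shares"),
--     "par_value": ("par value",),
--     "market_cap": ("market capitalisation", "market capitalization", "market cap"),
--     "foreign_percentage": ("foreign", "foreign percentage"),
--     "pe_ratio": ("p/e", "price earnings", "pe ratio"),
--     "pb_ratio": ("p/b", "price book", "pb ratio"),
--     "dividend_yield": ("dividend yield",),
-- }
--
-- def _extract_line_numbers(text, metric):
--     # hint-outer scan: collect the set of 0-based indices hit by any hint,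
--     # then rebuild the matches in index order.
--     lines = text.splitlines()
--     hit = set()
--     for hint in METRIC_HINTS.get(metric, ()):
--         for i, line in enumerate(lines):
--             if hint in line.lower():
--                 hit.add(i)
--     return [(i + 1, lines[i]) for i in sorted(hit)]
-- ===== Notes on version B (the rewrite author's own statement) =====
-- stated objective: alternative
-- what changed: Replaces A's single line-outer pass with a per-line any-hint test by a hint-outer double loop that collects the set of 0-based hit indices, then rebuilds the matches by sorting the index set and re-indexing into the line list.
import Mathlib
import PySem

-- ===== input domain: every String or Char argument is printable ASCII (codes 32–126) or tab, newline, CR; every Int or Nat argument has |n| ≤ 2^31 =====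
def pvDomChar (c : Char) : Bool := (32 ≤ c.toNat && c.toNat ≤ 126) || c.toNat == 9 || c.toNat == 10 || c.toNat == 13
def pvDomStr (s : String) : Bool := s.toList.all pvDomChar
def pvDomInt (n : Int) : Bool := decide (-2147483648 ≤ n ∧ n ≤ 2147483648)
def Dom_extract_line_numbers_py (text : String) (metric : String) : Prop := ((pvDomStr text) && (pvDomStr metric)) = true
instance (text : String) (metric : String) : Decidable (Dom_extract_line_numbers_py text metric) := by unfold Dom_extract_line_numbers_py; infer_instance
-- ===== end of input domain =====

-- B replaces A's per-line any-hint scan by a hint-outer pass collecting a set of hit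
-- indices and rebuilding the matches in sorted index order (objective: alternative).

-- ===== PORT A =====
-- module constant METRIC_HINTS (shared context of both programs)
def pvMetricHints : PySem.Dict String (List String) :=
  PySem.Dict.ofList
  [("revenue", ["revenue", "turnover", "sales"]),
   ("net_income", ["net income", "profit after tax", "pat", "profit for the year"]),
   ("eps", ["eps", "earnings per share"]),
   ("operating_profit", ["operating profit", "operating income", "results from operating"]),
   ("ebitda", ["ebitda"]),
   ("issued_shares", ["issued shares", "no. of shares", "shares"]),
   ("par_value", ["par value"]),
   ("market_cap", ["market capitalisation", "market capitalization", "market cap"]),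
   ("foreign_percentage", ["foreign", "foreign percentage"]),
   ("pe_ratio", ["p/e", "price earnings", "pe ratio"]),
   ("pb_ratio", ["p/b", "price book", "pb ratio"]),
   ("dividend_yield", ["dividend yield"])]

def extract_line_numbers_py (text : String) (metric : String) : List (Int × String) :=
  let hints := PySem.Dict.getD pvMetricHints metric []
  if hints = [] then []
  else
    let lines := PySem.Str.splitlines text
    (PySem.List.enumerate lines 1).foldl
      (fun acc p =>
        let lowered := PySem.Str.lower p.2
        if hints.any (fun hint => PySem.Str.isIn hint lowered) then acc ++ [(p.1, p.2)]
        else acc) []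

-- ===== PORT B =====
def extract_line_numbers_py_alt (text : String) (metric : String) : List (Int × String) :=
  let lines := PySem.Str.splitlines text
  let hit : PySem.Set Int :=
    (PySem.Dict.getD pvMetricHints metric []).foldl
      (fun hit hint =>
        (PySem.List.enumerate lines 0).foldl
          (fun hit p =>
            if PySem.Str.isIn hint (PySem.Str.lower p.2) then PySem.Set.add hit p.1 else hit)
          hit)
      PySem.Set.empty
  (PySem.List.sorted hit (fun i => i) false).map
    (fun i => (i + 1, (PySem.List.pyGet? lines i).getD ""))

-- ===== PRECONDITION & SPEC =====
def Spec_extract_line_numbers_py (text : String) (metric : String) (out : List (Int × String)) : Prop := out = extract_line_numbers_py_alt text metric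
instance (text : String) (metric : String) (out : List (Int × String)) : Decidable (Spec_extract_line_numbers_py text metric out) := by unfold Spec_extract_line_numbers_py; infer_instance

-- ===== CLAIM (what is proved, stated in full; the proofs are below) =====
def Claim_equal_extract_line_numbers_py : Prop := ∀ (text : String) (metric : String), Dom_extract_line_numbers_py text metric → Spec_extract_line_numbers_py text metric (extract_line_numbers_py text metric)

-- ===== LEMMAS AND PROOFS =====

-- membership in the inner (one hint) index-collecting fold
theorem pvInnerMem (c : Int × String → Bool) (l : List (Int × String)) (s : PySem.Set Int) (i : Int) :
    i ∈ l.foldl (fun s p => if c p then PySem.Set.add s p.1 else s) s ↔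
      i ∈ s ∨ ∃ p ∈ l, c p ∧ i = p.1 := by
  induction l generalizing s with
  | nil => simp
  | cons hd tl ih =>
    simp only [List.foldl_cons, ih]
    by_cases h : c hd = true
    · simp [h, PySem.Set.mem_add]
      tauto
    · simp [h]

theorem pvInnerNodup (c : Int × String → Bool) (l : List (Int × String)) (s : PySem.Set Int)
    (hs : s.Nodup) : (l.foldl (fun s p => if c p then PySem.Set.add s p.1 else s) s).Nodup := by
  induction l generalizing s with
  | nil => exact hs
  | cons hd tl ih =>
    simp only [List.foldl_cons]
    by_cases h : c hd = true
    · simp only [h, if_pos]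
      exact ih _ (PySem.Set.nodup_add _ _ hs)
    · simp only [h]
      exact ih _ hs

-- membership in the whole hint-outer fold
theorem pvOuterMem (hs : List String) (l : List (Int × String)) (s : PySem.Set Int) (i : Int) :
    i ∈ hs.foldl (fun s h => l.foldl (fun s p => if PySem.Str.isIn h (PySem.Str.lower p.2) then PySem.Set.add s p.1 else s) s) s ↔
      i ∈ s ∨ ∃ h ∈ hs, ∃ p ∈ l, PySem.Str.isIn h (PySem.Str.lower p.2) ∧ i = p.1 := by
  induction hs generalizing s with
  | nil => simp
  | cons hd tl ih =>
    simp only [List.foldl_cons, ih, pvInnerMem, List.mem_cons]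
    constructor
    · rintro (⟨h1 | ⟨p, hp, hc, hi⟩⟩ | ⟨h, hh, rest⟩)
      · exact Or.inl h1
      · exact Or.inr ⟨hd, Or.inl rfl, p, hp, hc, hi⟩
      · exact Or.inr ⟨h, Or.inr hh, rest⟩
    · rintro (h1 | ⟨h, (rfl | hh), rest⟩)
      · exact Or.inl (Or.inl h1)
      · exact Or.inl (Or.inr rest)
      · exact Or.inr ⟨h, hh, rest⟩

theorem pvOuterNodup (hs : List String) (l : List (Int × String)) (s : PySem.Set Int)
    (h : s.Nodup) :
    (hs.foldl (fun s h => l.foldl (fun s p => if PySem.Str.isIn h (PySem.Str.lower p.2) then PySem.Set.add s p.1 else s) s) s).Nodup := by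
  induction hs generalizing s with
  | nil => exact h
  | cons hd tl ih => exact ih _ (pvInnerNodup _ _ _ h)

-- shifting the start of enumerate
theorem pvEnumShift {α : Type} (xs : List α) (s : Int) :
    PySem.List.enumerate xs (s + 1) = (PySem.List.enumerate xs s).map (fun p => (p.1 + 1, p.2)) := by
  induction xs generalizing s with
  | nil => simp [PySem.List.enumerate_nil]
  | cons hd tl ih =>
    simp [PySem.List.enumerate_cons, ih (s + 1)]

-- ===== VERDICT (by name: the statement is the Claim_ definition above) =====
theorem extract_line_numbers_py_spec : Claim_equal_extract_line_numbers_py := by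
  intro text metric _
  unfold Spec_extract_line_numbers_py extract_line_numbers_py extract_line_numbers_py_alt
  set hints := PySem.Dict.getD pvMetricHints metric [] with hh
  set lines := PySem.Str.splitlines text with hl
  simp only []
  by_cases hne : hints = []
  · rw [if_pos hne, hne]
    simp [PySem.List.sorted_eq_nil_iff]
  · rw [if_neg hne]
    -- B's sorted hit list equals the increasing list of matched indices
    set q : Int × String → Bool := fun p => hints.any (fun hint => PySem.Str.isIn hint (PySem.Str.lower p.2)) with hq
    have hA : (PySem.List.enumerate lines 1).foldl
        (fun acc p => if q p then acc ++ [(p.1, p.2)] else acc) [] =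
        ((PySem.List.enumerate lines 1).filter q).map (fun p => (p.1, p.2)) := by
      simpa using PySem.List.foldl_append_if q (fun p => (p.1, p.2)) (PySem.List.enumerate lines 1) []
    rw [hA]
    set ys : List Int := ((PySem.List.enumerate lines 0).filter q).map (fun p => p.1) with hys
    set hit : PySem.Set Int := hints.foldl
      (fun hit hint => (PySem.List.enumerate lines 0).foldl
        (fun hit p => if PySem.Str.isIn hint (PySem.Str.lower p.2) then PySem.Set.add hit p.1 else hit) hit)
      PySem.Set.empty with hhit
    have hpair : ys.Pairwise (· < ·) :=
      List.pairwise_map.mpr ((PySem.List.pairwise_lt_enumerate lines 0).filter _)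
    have hysnd : ys.Nodup := hpair.imp (fun h => ne_of_lt h)
    have hhitnd : hit.Nodup := pvOuterNodup _ _ _ List.nodup_nil
    have hmem : ∀ i : Int, i ∈ ys ↔ i ∈ hit := by
      intro i
      rw [hhit, pvOuterMem, hys]
      simp only [List.mem_map, List.mem_filter, hq, List.any_eq_true, PySem.Set.empty, List.not_mem_nil,
        false_or]
      constructor
      · rintro ⟨p, ⟨hp, h, hh, hc⟩, rfl⟩
        exact ⟨h, hh, p, hp, hc, rfl⟩
      · rintro ⟨h, hh, p, hp, hc, rfl⟩
        exact ⟨p, ⟨hp, h, hh, hc⟩, rfl⟩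
    have hperm : ys.Perm hit := (List.perm_ext_iff_of_nodup hysnd hhitnd).mpr hmem
    have hsorted : PySem.List.sorted hit (fun i => i) false = ys :=
      PySem.List.sorted_eq_of_perm_of_pairwise_lt hit ys (fun i => i) hperm (by simpa using hpair)
    rw [hsorted, hys, List.map_map]
    rw [show (1 : Int) = 0 + 1 from by ring, pvEnumShift, List.filter_map, List.map_map]
    apply List.map_congr_left
    intro p hp
    have hpe : p ∈ PySem.List.enumerate lines 0 := (List.mem_filter.mp hp).1
    obtain ⟨k, hk, rfl⟩ := (PySem.List.mem_enumerate_iff lines 0 p).mp hpe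
    simp [Function.comp, hk]
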